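-- pv_equiv track=rewrite | github.com/Coxamouna/PythonExercisesGentlyExplained | buy8get1free.py | getCostOfCoffee
-- ===== SOURCE A (Python) =====
-- def getCostOfCoffee(numberOfCoffees, pricePerCoffee):
--     # formula attempt:
--     # total = (numberOfCoffees % 9 + int(numberOfCoffees / 9) * numberOfCoffees) * pricePerCoffee
--
--     # tracking the total price
--     total = 0
--
--     # tracking how many coffees we have till we get a free one:
--     cupsUntilFreeCoffee = 8
--
--     # loop until the number of coffees is to buy reaches 0:
--     while (numberOfCoffees > 0):
--         # decrement the number of coffees left to buy:
--         numberOfCoffees -= 1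
--
--         # if this cup of coffee is free, reset the number to buy
--         # until a free cup back to 8:
--         if (cupsUntilFreeCoffee == 0):
--             cupsUntilFreeCoffee = 8
--         # otherwise, pay for a cup of coffee:
--         else:
--             # increment the total price:
--             total += pricePerCoffee
--             # decrement the coffees left until we get a free coffee:
--             cupsUntilFreeCoffee -= 1
--
--     # return the total price:
--     return total
-- ===== SOURCE B (Python) =====
-- def getCostOfCoffee(numberOfCoffees, pricePerCoffee):
--     # Closed form: every 9th coffee is free, so pay for n - n // 9 cups.
--     n = max(numberOfCoffees, 0)
--     return (n - n // 9) * pricePerCoffee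
-- ===== Notes on version B (the rewrite author's own statement) =====
-- stated objective: faster
-- what changed: Replaced the cup-by-cup while loop with the closed form (n - n//9) * price (n clamped to 0).
import Mathlib
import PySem

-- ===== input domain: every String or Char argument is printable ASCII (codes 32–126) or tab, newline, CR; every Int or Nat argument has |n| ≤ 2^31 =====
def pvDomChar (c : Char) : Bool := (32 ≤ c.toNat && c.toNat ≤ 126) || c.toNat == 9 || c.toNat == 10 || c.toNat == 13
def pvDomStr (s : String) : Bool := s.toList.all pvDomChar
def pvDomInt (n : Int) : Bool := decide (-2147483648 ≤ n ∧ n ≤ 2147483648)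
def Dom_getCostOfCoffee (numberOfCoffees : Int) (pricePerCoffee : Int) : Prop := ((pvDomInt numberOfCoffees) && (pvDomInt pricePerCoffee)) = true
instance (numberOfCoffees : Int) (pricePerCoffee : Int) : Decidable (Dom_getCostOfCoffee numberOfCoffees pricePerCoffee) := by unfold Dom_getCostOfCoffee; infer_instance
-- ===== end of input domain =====

-- ===== PORT A =====
-- Literal transliteration of A's while loop: state (numberOfCoffees, cupsUntilFreeCoffee, total).
def pvLoopA (price : Int) (n cups total : Int) : Int :=
  if _h : n > 0 then
    if cups == 0 then pvLoopA price (n - 1) 8 total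
    else pvLoopA price (n - 1) (cups - 1) (total + price)
  else total
termination_by n.toNat
decreasing_by all_goals omega

def getCostOfCoffee (numberOfCoffees : Int) (pricePerCoffee : Int) : Int :=
  pvLoopA pricePerCoffee numberOfCoffees 8 0

-- ===== PORT B =====
def getCostOfCoffee_alt (numberOfCoffees : Int) (pricePerCoffee : Int) : Int :=
  let n := max numberOfCoffees 0
  (n - PySem.Int.floordiv n 9) * pricePerCoffee

-- ===== PRECONDITION & SPEC =====
def Spec_getCostOfCoffee (numberOfCoffees : Int) (pricePerCoffee : Int) (out : Int) : Prop := out = getCostOfCoffee_alt numberOfCoffees pricePerCoffee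
instance (numberOfCoffees : Int) (pricePerCoffee : Int) (out : Int) : Decidable (Spec_getCostOfCoffee numberOfCoffees pricePerCoffee out) := by unfold Spec_getCostOfCoffee; infer_instance

-- ===== CLAIM (what is proved, stated in full; the proofs are below) =====
def Claim_equal_getCostOfCoffee : Prop := ∀ (numberOfCoffees : Int) (pricePerCoffee : Int), Dom_getCostOfCoffee numberOfCoffees pricePerCoffee → Spec_getCostOfCoffee numberOfCoffees pricePerCoffee (getCostOfCoffee numberOfCoffees pricePerCoffee)

-- ===== LEMMAS AND PROOFS =====
-- Loop invariant: with 0 ≤ cups ≤ 8, the loop adds price for every cup except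
-- the free ones, of which there are (max n 0 + (8 - cups)) / 9.
theorem pvLoopA_eq (price : Int) : ∀ (k : Nat) (n cups total : Int), n.toNat = k → 0 ≤ cups → cups ≤ 8 →
    pvLoopA price n cups total = total + price * (max n 0 - (max n 0 + (8 - cups)) / 9) := by
  intro k
  induction k with
  | zero =>
    intro n cups total hk h0 h8
    rw [pvLoopA]
    have hn : ¬ n > 0 := by omega
    simp only [hn, dite_false]
    have : max n 0 = 0 := by omega
    rw [this]
    have : (0 + (8 - cups)) / 9 = 0 := by omega
    rw [this]; ring
  | succ k ih =>
    intro n cups total hk h0 h8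
    rw [pvLoopA]
    have hn : n > 0 := by omega
    simp only [hn, dite_true]
    simp only [beq_iff_eq]
    split_ifs with hc
    · rw [ih (n - 1) 8 total (by omega) (by omega) (by omega)]
      have h1 : max n 0 = n := by omega
      have h2 : max (n - 1) 0 = n - 1 := by omega
      have h3 : (n - 1) + (8 - 8) = n - 1 := by ring
      have h4 : n + (8 - cups) = n + 8 := by rw [hc]; ring
      have h5 : n + 8 = (n - 1) + 1 * 9 := by ring
      rw [h1, h2, h3, h4, h5, Int.add_mul_ediv_right _ _ (by norm_num : (9:Int) ≠ 0)]
      ring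
    · rw [ih (n - 1) (cups - 1) (total + price) (by omega) (by omega) (by omega)]
      have h1 : max n 0 = n := by omega
      have h2 : max (n - 1) 0 = n - 1 := by omega
      have h3 : n - 1 + (8 - (cups - 1)) = n + (8 - cups) := by ring
      rw [h1, h2, h3]
      ring

-- ===== VERDICT (by name: the statement is the Claim_ definition above) =====
theorem getCostOfCoffee_spec : Claim_equal_getCostOfCoffee := by
  intro n price _
  unfold Spec_getCostOfCoffee getCostOfCoffee getCostOfCoffee_alt
  show pvLoopA price n 8 0 = (max n 0 - PySem.Int.floordiv (max n 0) 9) * price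
  rw [pvLoopA_eq price n.toNat n 8 0 rfl (by omega) (by omega),
      PySem.Int.floordiv_eq_ediv_of_pos (by norm_num : (0:Int) < 9)]
  have h : max n 0 + (8 - 8) = max n 0 := by ring
  rw [h]; ring
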